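-- pv_equiv track=rewrite | github.com/raeez/chiral-bar-cobar | compute/lib/theorem_admissible_sl3_libar_engine.py | _root_tor_multiplicity
-- ===== SOURCE A (Python) =====
-- from math import gcd, comb, factorial
-- from typing import Dict, List, Optional, Tuple, Set, Any
--
-- N_ROOT = 6
--
-- def tor_weight(d: int, p_bar: int) -> Optional[int]:
--     """Return the unique weight where Tor^{k[x]/(x^d)}_p is nonzero, or None."""
--     if d <= 0 or (d == 1 and p_bar > 0):
--         return None
--     if p_bar == 0:
--         return 0
--     if p_bar % 2 == 0:
--         return (p_bar // 2) * d
--     else: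
--         return ((p_bar - 1) // 2) * d + 1
--
-- def _root_tor_multiplicity(d_R: int, p_root: int, w_root: int) -> int:
--     """Number of ways to distribute p_root bar degree among N_ROOT root gens
--     at total weight w_root, for root gens truncated at degree d_R.
--
--     For d_R = 2: diagonal (w_root must equal p_root), mult = C(p_root+5, 5).
--     For d_R >= 3: each root gen's Tor has specific (bar, weight) pairs.
--     """
--     if d_R == 2:
--         if w_root != p_root:
--             return 0
--         return comb(p_root + N_ROOT - 1, N_ROOT - 1)
--
--     # General d_R: each root gen i has Tor_{p_i} at weight w_i where
--     # w_i = tor_weight(d_R, p_i). Need sum p_i = p_root, sum w_i = w_root.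
--     # Use DP over the 6 root generators.
--     # State: (remaining_gens, remaining_p, remaining_w)
--     dp = {(p_root, w_root): 1}
--     for _ in range(N_ROOT):
--         new_dp: Dict[Tuple[int, int], int] = {}
--         for (rp, rw), cnt in dp.items():
--             if cnt == 0:
--                 continue
--             # This gen contributes p_i bar degree, w_i weight
--             for p_i in range(rp + 1):
--                 tw_i = tor_weight(d_R, p_i)
--                 if tw_i is None:
--                     continue
--                 w_i = tw_i
--                 if w_i > rw:
--                     continue
--                 key = (rp - p_i, rw - w_i)
--                 new_dp[key] = new_dp.get(key, 0) + cnt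
--         dp = new_dp
--
--     return dp.get((0, 0), 0)
-- ===== SOURCE B (Python) =====
-- from math import comb
--
-- N_ROOT = 6
--
-- def _root_tor_multiplicity(d_R: int, p_root: int, w_root: int) -> int:
--     """Closed form: a root gen with bar degree p_i = 2*a_i + e_i (e_i in {0,1})
--     sits at weight a_i*d_R + e_i, so with s = number of odd gens and
--     A = sum a_i we need p_root = 2*A + s and w_root = A*d_R + s; solving
--     gives s = (d_R*p_root - 2*w_root)/(d_R - 2), and the multiplicity is
--     C(6, s) * C(A + 5, 5) (choose the odd gens, stars-and-bars for the a_i)."""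
--     if d_R == 2:
--         if w_root != p_root:
--             return 0
--         return comb(p_root + N_ROOT - 1, N_ROOT - 1)
--     if d_R <= 0:
--         return 0
--     if d_R == 1:
--         # only Tor_0 exists: every gen contributes (0, 0)
--         return 1 if p_root == 0 and w_root == 0 else 0
--     num = d_R * p_root - 2 * w_root
--     den = d_R - 2
--     if num % den != 0:
--         return 0
--     s = num // den
--     if s < 0 or s > N_ROOT or (p_root - s) % 2 != 0:
--         return 0
--     A = (p_root - s) // 2
--     if A < 0:
--         return 0
--     return comb(N_ROOT, s) * comb(A + N_ROOT - 1, N_ROOT - 1)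
-- ===== Notes on version B (the rewrite author's own statement) =====
-- stated objective: faster
-- what changed: Replaces the 6-round dictionary DP over (remaining bar degree, remaining weight) by a closed form: the odd-generator count s is determined by s = (d_R*p_root - 2*w_root)/(d_R - 2), and the multiplicity is C(6,s)*C((p_root-s)/2 + 5, 5).
import Mathlib
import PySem

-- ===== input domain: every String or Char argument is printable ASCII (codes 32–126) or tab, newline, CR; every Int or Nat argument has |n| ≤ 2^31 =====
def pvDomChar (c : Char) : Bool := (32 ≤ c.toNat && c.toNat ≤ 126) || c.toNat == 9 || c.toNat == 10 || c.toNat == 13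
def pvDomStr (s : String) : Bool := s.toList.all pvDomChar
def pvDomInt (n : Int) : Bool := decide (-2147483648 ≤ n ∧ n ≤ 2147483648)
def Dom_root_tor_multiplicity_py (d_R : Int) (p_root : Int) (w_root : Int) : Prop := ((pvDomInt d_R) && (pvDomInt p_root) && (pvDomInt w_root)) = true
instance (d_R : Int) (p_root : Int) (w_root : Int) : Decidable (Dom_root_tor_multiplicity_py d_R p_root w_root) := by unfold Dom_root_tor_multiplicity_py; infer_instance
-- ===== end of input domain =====

-- B replaces A's 6-round dictionary DP by a closed form (solve for the number of odd
-- generators, then two binomial coefficients); objective: faster (asymptotic).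

-- ===== PORT A =====

-- math.comb n k; exact for 0 ≤ n (Pre_ excludes the one case where A calls it on n < 0, which raises)
def pyComb (n k : Int) : Int := (n.toNat.choose k.toNat : Int)

-- tor_weight(d, p_bar)
def torWeight (d p_bar : Int) : Option Int :=
  if d ≤ 0 ∨ (d = 1 ∧ p_bar > 0) then none
  else if p_bar = 0 then some 0
  else if PySem.Int.mod p_bar 2 = 0 then some (PySem.Int.floordiv p_bar 2 * d)
  else some (PySem.Int.floordiv (p_bar - 1) 2 * d + 1)

-- the inner 'for p_i in range(rp + 1)' loop of A, accumulating into new_dp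
def rtmInner (d_R rp rw cnt : Int) (nd : PySem.Dict (Int × Int) Int) : PySem.Dict (Int × Int) Int :=
  (PySem.List.pyRange 0 (rp + 1) 1).foldl (fun nd p_i =>
    match torWeight d_R p_i with
    | none => nd
    | some w_i =>
      if w_i > rw then nd
      else nd.insert (rp - p_i, rw - w_i) (nd.getD (rp - p_i, rw - w_i) 0 + cnt)) nd

-- one pass of A's 'for _ in range(N_ROOT)' loop: dp ↦ new_dp
def rtmStep (d_R : Int) (dp : PySem.Dict (Int × Int) Int) : PySem.Dict (Int × Int) Int :=
  dp.items.foldl (fun new_dp kv =>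
    if kv.2 = 0 then new_dp
    else rtmInner d_R kv.1.1 kv.1.2 kv.2 new_dp) PySem.Dict.empty

def root_tor_multiplicity_py (d_R : Int) (p_root : Int) (w_root : Int) : Int :=
  if d_R = 2 then
    if w_root ≠ p_root then 0
    else pyComb (p_root + 6 - 1) (6 - 1)
  else
    let dp0 : PySem.Dict (Int × Int) Int := PySem.Dict.empty.insert (p_root, w_root) 1
    let dpf := (List.range 6).foldl (fun dp _ => rtmStep d_R dp) dp0
    dpf.getD (0, 0) 0

-- ===== PORT B =====

def root_tor_multiplicity_py_alt (d_R : Int) (p_root : Int) (w_root : Int) : Int :=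
  if d_R = 2 then
    if w_root ≠ p_root then 0
    else pyComb (p_root + 6 - 1) (6 - 1)
  else if d_R ≤ 0 then 0
  else if d_R = 1 then (if p_root = 0 ∧ w_root = 0 then 1 else 0)
  else
    let num := d_R * p_root - 2 * w_root
    let den := d_R - 2
    if PySem.Int.mod num den ≠ 0 then 0
    else
      let s := PySem.Int.floordiv num den
      if s < 0 ∨ 6 < s ∨ PySem.Int.mod (p_root - s) 2 ≠ 0 then 0
      else
        let A := PySem.Int.floordiv (p_root - s) 2
        if A < 0 then 0
        else pyComb 6 s * pyComb (A + 6 - 1) (6 - 1)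

-- ===== PRECONDITION & SPEC =====
-- Pre_ excludes exactly the inputs where A raises ValueError: d_R = 2 with w_root = p_root < -5
-- makes A call math.comb on a negative first argument (B raises there too).
def Pre_root_tor_multiplicity_py (d_R : Int) (p_root : Int) (w_root : Int) : Prop :=
  ¬ (d_R = 2 ∧ w_root = p_root ∧ p_root + 5 < 0)
instance (d_R : Int) (p_root : Int) (w_root : Int) : Decidable (Pre_root_tor_multiplicity_py d_R p_root w_root) := by unfold Pre_root_tor_multiplicity_py; infer_instance

def pvWitness_root_tor_multiplicity_py : Int × Int × Int := (3, 2, 3)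

def Spec_root_tor_multiplicity_py (d_R : Int) (p_root : Int) (w_root : Int) (out : Int) : Prop := out = root_tor_multiplicity_py_alt d_R p_root w_root
instance (d_R : Int) (p_root : Int) (w_root : Int) (out : Int) : Decidable (Spec_root_tor_multiplicity_py d_R p_root w_root out) := by unfold Spec_root_tor_multiplicity_py; infer_instance

-- ===== CLAIM (what is proved, stated in full; the proofs are below) =====
def Claim_equal_root_tor_multiplicity_py : Prop := ∀ (d_R : Int) (p_root : Int) (w_root : Int), Dom_root_tor_multiplicity_py d_R p_root w_root → Pre_root_tor_multiplicity_py d_R p_root w_root → Spec_root_tor_multiplicity_py d_R p_root w_root (root_tor_multiplicity_py d_R p_root w_root)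

-- ===== LEMMAS AND PROOFS =====

-- rtmH d m rp rw: value that A's DP attaches to state (rp, rw) with m generators left
def rtmH (d : Int) : Nat → Int → Int → Int
  | 0, rp, rw => if rp = 0 ∧ rw = 0 then 1 else 0
  | m + 1, rp, rw =>
    ((PySem.List.pyRange 0 (rp + 1) 1).map (fun p_i =>
      match torWeight d p_i with
      | none => 0
      | some w_i => if w_i > rw then 0 else rtmH d m (rp - p_i) (rw - w_i))).sum

-- B's closed form, generalized from 6 generators to m
def rtmG (d : Int) : Nat → Int → Int → Int
  | 0, p, w => if p = 0 ∧ w = 0 then 1 else 0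
  | m + 1, p, w =>
    if (d * p - 2 * w) % (d - 2) = 0 ∧ 0 ≤ (d * p - 2 * w) / (d - 2)
        ∧ (d * p - 2 * w) / (d - 2) ≤ (m : Int) + 1
        ∧ (p - (d * p - 2 * w) / (d - 2)) % 2 = 0 ∧ 0 ≤ p - (d * p - 2 * w) / (d - 2) then
      ((m + 1).choose ((d * p - 2 * w) / (d - 2)).toNat : Int)
        * (((p - (d * p - 2 * w) / (d - 2)) / 2 + (m : Int)).toNat.choose m : Int)
    else 0

-- weighted sum of a dict's items against a key valuation
def wsum (g : Int × Int → Int) (ℓ : List ((Int × Int) × Int)) : Int :=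
  (ℓ.map (fun kv => kv.2 * g kv.1)).sum

def keysND (ℓ : List ((Int × Int) × Int)) : Prop := (ℓ.map (fun kv => kv.1)).Nodup

theorem keysND_insert (d : PySem.Dict (Int × Int) Int) (k : Int × Int) (v : Int)
    (h : keysND d.items) : keysND (d.insert k v).items := by
  unfold keysND at *
  unfold PySem.Dict.insert
  split
  · rename_i hc
    show ((d.items.map fun p => if (p.1 == k) = true then (k, v) else p).map fun kv => kv.1).Nodup
    have : ((d.items.map fun p => if (p.1 == k) = true then (k, v) else p).map fun kv => kv.1)
        = d.items.map (fun kv => kv.1) := by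
      rw [List.map_map]
      apply List.map_congr_left
      intro p _
      by_cases hp : p.1 = k <;> simp [hp]
    rwa [this]
  · rename_i hc
    show ((d.items ++ [(k, v)]).map fun kv => kv.1).Nodup
    rw [List.map_append]
    simp only [List.map_cons, List.map_nil]
    rw [List.nodup_append]
    refine ⟨h, by simp, ?_⟩
    intro a ha b hb heq
    simp only [List.mem_singleton] at hb
    subst hb; subst heq
    apply hc
    unfold PySem.Dict.contains
    rw [List.any_eq_true]
    simp only [List.mem_map] at ha
    obtain ⟨kv, hmem, hk⟩ := ha
    exact ⟨kv, hmem, by simp [hk]⟩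

theorem wsum_cons (g : Int × Int → Int) (kv : (Int × Int) × Int) (ℓ : List ((Int × Int) × Int)) :
    wsum g (kv :: ℓ) = kv.2 * g kv.1 + wsum g ℓ := by simp [wsum]

theorem wsum_replace (k : Int × Int) (w : Int) (g : Int × Int → Int) :
    ∀ ℓ : List ((Int × Int) × Int), keysND ℓ → (PySem.Dict.mk ℓ).contains k = true →
    wsum g (ℓ.map (fun p => if (p.1 == k) = true then (k, w) else p))
      = wsum g ℓ + (w - (PySem.Dict.mk ℓ).getD k 0) * g k := by
  intro ℓ
  induction ℓ with
  | nil => intro _ hc; simp [PySem.Dict.contains] at hc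
  | cons p rest ih =>
    obtain ⟨pk, pv⟩ := p
    intro hnd hc
    have hnd' : keysND rest := by
      unfold keysND at hnd ⊢; simpa using (List.nodup_cons.mp (by simpa using hnd)).2
    by_cases hk : pk = k
    · have htail : rest.map (fun p => if (p.1 == k) = true then (k, w) else p) = rest := by
        have h1 : ∀ q ∈ rest, (fun p => if (p.1 == k) = true then (k, w) else p) q = id q := by
          intro q hq
          have : q.1 ≠ k := by
            unfold keysND at hnd
            simp only [List.map_cons, List.nodup_cons] at hnd
            intro he
            exact hnd.1 (by rw [hk, ← he]; exact List.mem_map_of_mem hq)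
          simp [this]
        simpa using List.map_congr_left h1
      simp only [List.map_cons, hk, beq_self_eq_true, if_true, htail]
      rw [wsum_cons, wsum_cons]
      have hget2 : (PySem.Dict.mk ((k, pv) :: rest)).getD k 0 = pv := by
        simp [PySem.Dict.getD, PySem.Dict.get?_mk_cons]
      rw [hget2]
      ring
    · have hc' : (PySem.Dict.mk rest).contains k = true := by
        simp only [PySem.Dict.contains, List.any_cons] at hc ⊢
        simpa [hk] using hc
      have hget : (PySem.Dict.mk ((pk, pv) :: rest)).getD k 0 = (PySem.Dict.mk rest).getD k 0 := by
        simp [PySem.Dict.getD, PySem.Dict.get?_mk_cons, hk]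
      simp only [List.map_cons]
      rw [if_neg (by simpa using hk)]
      rw [wsum_cons, wsum_cons, ih hnd' hc', hget]
      ring

theorem wsum_insertAdd (d : PySem.Dict (Int × Int) Int) (k : Int × Int) (c : Int)
    (g : Int × Int → Int) (h : keysND d.items) :
    wsum g (d.insert k (d.getD k 0 + c)).items = wsum g d.items + c * g k := by
  unfold PySem.Dict.insert
  by_cases hc : d.contains k = true
  · simp only [hc, if_true]
    have := wsum_replace k (d.getD k 0 + c) g d.items h (by obtain ⟨ℓ⟩ := d; exact hc)
    obtain ⟨ℓ⟩ := d
    rw [this]; ring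
  · simp only [hc]
    have hget : d.getD k 0 = 0 := by
      unfold PySem.Dict.getD PySem.Dict.get?
      rw [List.find?_eq_none.mpr]
      · rfl
      · intro p hp hbeq
        exact hc (by unfold PySem.Dict.contains; rw [List.any_eq_true]; exact ⟨p, hp, hbeq⟩)
    show wsum g (d.items ++ [(k, _)]) = _
    unfold wsum
    rw [List.map_append, List.sum_append, hget]
    simp

theorem rtmInner_fold (d rp rw cnt : Int) (m : Nat) :
    ∀ (L : List Int) (nd : PySem.Dict (Int × Int) Int), keysND nd.items →
    keysND ((L.foldl (fun nd p_i =>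
      match torWeight d p_i with
      | none => nd
      | some w_i =>
        if w_i > rw then nd
        else nd.insert (rp - p_i, rw - w_i) (nd.getD (rp - p_i, rw - w_i) 0 + cnt)) nd).items) ∧
    wsum (fun k => rtmH d m k.1 k.2) ((L.foldl (fun nd p_i =>
      match torWeight d p_i with
      | none => nd
      | some w_i =>
        if w_i > rw then nd
        else nd.insert (rp - p_i, rw - w_i) (nd.getD (rp - p_i, rw - w_i) 0 + cnt)) nd).items)
      = wsum (fun k => rtmH d m k.1 k.2) nd.items
        + cnt * ((L.map (fun p_i =>
            match torWeight d p_i with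
            | none => 0
            | some w_i => if w_i > rw then 0 else rtmH d m (rp - p_i) (rw - w_i))).sum) := by
  intro L
  induction L with
  | nil => intro nd h; exact ⟨h, by simp⟩
  | cons p_i L ih =>
    intro nd h
    simp only [List.foldl_cons, List.map_cons, List.sum_cons]
    cases htw : torWeight d p_i with
    | none =>
      obtain ⟨h1, h2⟩ := ih nd h
      exact ⟨h1, by rw [h2]; simp⟩
    | some w_i =>
      by_cases hg : w_i > rw
      · simp only [hg, if_true]
        obtain ⟨h1, h2⟩ := ih nd h
        exact ⟨h1, by rw [h2]; simp⟩
      · simp only [hg, if_false]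
        obtain ⟨h1, h2⟩ := ih _ (keysND_insert nd _ _ h)
        refine ⟨h1, ?_⟩
        rw [h2, wsum_insertAdd nd _ cnt _ h]
        ring

theorem rtmInner_spec (d rp rw cnt : Int) (m : Nat) (nd : PySem.Dict (Int × Int) Int)
    (h : keysND nd.items) :
    keysND (rtmInner d rp rw cnt nd).items ∧
    wsum (fun k => rtmH d m k.1 k.2) (rtmInner d rp rw cnt nd).items
      = wsum (fun k => rtmH d m k.1 k.2) nd.items + cnt * rtmH d (m + 1) rp rw := by
  have := rtmInner_fold d rp rw cnt m (PySem.List.pyRange 0 (rp + 1) 1) nd h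
  exact ⟨this.1, by rw [show rtmH d (m + 1) rp rw = _ from rfl]; exact this.2⟩

theorem rtmStep_fold (d : Int) (m : Nat) :
    ∀ (items : List ((Int × Int) × Int)) (nd : PySem.Dict (Int × Int) Int), keysND nd.items →
    keysND ((items.foldl (fun new_dp kv =>
        if kv.2 = 0 then new_dp
        else rtmInner d kv.1.1 kv.1.2 kv.2 new_dp) nd).items) ∧
    wsum (fun k => rtmH d m k.1 k.2) ((items.foldl (fun new_dp kv =>
        if kv.2 = 0 then new_dp
        else rtmInner d kv.1.1 kv.1.2 kv.2 new_dp) nd).items)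
      = wsum (fun k => rtmH d m k.1 k.2) nd.items
        + wsum (fun k => rtmH d (m + 1) k.1 k.2) items := by
  intro items
  induction items with
  | nil => intro nd h; exact ⟨h, by simp [wsum]⟩
  | cons kv rest ih =>
    intro nd h
    simp only [List.foldl_cons, wsum_cons]
    by_cases hz : kv.2 = 0
    · simp only [hz, if_true]
      obtain ⟨h1, h2⟩ := ih nd h
      exact ⟨h1, by rw [h2]; ring⟩
    · simp only [hz, if_false]
      obtain ⟨hk1, hk2⟩ := rtmInner_spec d kv.1.1 kv.1.2 kv.2 m nd h
      obtain ⟨h1, h2⟩ := ih _ hk1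
      refine ⟨h1, ?_⟩
      rw [h2, hk2]
      ring

theorem rtmStep_spec (d : Int) (m : Nat) (dp : PySem.Dict (Int × Int) Int) :
    keysND (rtmStep d dp).items ∧
    wsum (fun k => rtmH d m k.1 k.2) (rtmStep d dp).items
      = wsum (fun k => rtmH d (m + 1) k.1 k.2) dp.items := by
  have h0 : keysND (PySem.Dict.empty : PySem.Dict (Int × Int) Int).items := by
    simp [keysND, PySem.Dict.empty]
  have := rtmStep_fold d m dp.items PySem.Dict.empty h0
  unfold rtmStep
  exact ⟨this.1, by rw [this.2]; simp [wsum, PySem.Dict.empty]⟩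

theorem rtmIter_spec (d : Int) (n : Nat) :
    ∀ (m : Nat) (dp : PySem.Dict (Int × Int) Int), keysND dp.items →
    keysND (((List.range n).foldl (fun dp _ => rtmStep d dp) dp).items) ∧
    wsum (fun k => rtmH d m k.1 k.2) (((List.range n).foldl (fun dp _ => rtmStep d dp) dp).items)
      = wsum (fun k => rtmH d (m + n) k.1 k.2) dp.items := by
  induction n with
  | zero => intro m dp h; exact ⟨h, by simp⟩
  | succ n ih =>
    intro m dp h
    rw [List.range_succ, List.foldl_append]
    simp only [List.foldl_cons, List.foldl_nil]
    obtain ⟨h1, h2⟩ := ih (m + 1) dp h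
    obtain ⟨h3, h4⟩ := rtmStep_spec d m ((List.range n).foldl (fun dp _ => rtmStep d dp) dp)
    refine ⟨h3, ?_⟩
    rw [h4, h2]
    have : m + 1 + n = m + (n + 1) := by omega
    rw [this]

theorem wsum_zero_of_ne (dd : Int) (ℓ : List ((Int × Int) × Int))
    (h : ∀ kv ∈ ℓ, kv.1 ≠ ((0 : Int), (0 : Int))) :
    wsum (fun k => rtmH dd 0 k.1 k.2) ℓ = 0 := by
  apply List.sum_eq_zero
  intro x hx
  simp only [List.mem_map] at hx
  obtain ⟨kv, hmem, hkv⟩ := hx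
  have := h kv hmem
  rw [← hkv]
  have hne : ¬ (kv.1.1 = 0 ∧ kv.1.2 = 0) := by
    intro hc
    exact this (Prod.ext hc.1 hc.2)
  simp [rtmH, hne]

theorem getD_eq_wsum (dd : Int) (d : PySem.Dict (Int × Int) Int) (h : keysND d.items) :
    d.getD (0, 0) 0 = wsum (fun k => rtmH dd 0 k.1 k.2) d.items := by
  obtain ⟨ℓ⟩ := d
  induction ℓ with
  | nil => simp [PySem.Dict.getD, PySem.Dict.get?, wsum]
  | cons kv rest ih =>
    obtain ⟨k, v⟩ := kv
    have hnd' : keysND rest := by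
      unfold keysND at h ⊢; simpa using (List.nodup_cons.mp (by simpa using h)).2
    by_cases hk : k = ((0 : Int), (0 : Int))
    · subst hk
      have hget : (PySem.Dict.mk (((0, 0), v) :: rest)).getD (0, 0) 0 = v := by
        simp [PySem.Dict.getD, PySem.Dict.get?_mk_cons]
      rw [hget, wsum_cons]
      have hrest : wsum (fun k => rtmH dd 0 k.1 k.2) rest = 0 := by
        apply wsum_zero_of_ne
        intro kv hmem hc
        unfold keysND at h
        simp only [List.map_cons, List.nodup_cons] at h
        exact h.1 (hc ▸ List.mem_map_of_mem hmem)
      rw [hrest]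
      simp [rtmH]
    · have hget : (PySem.Dict.mk ((k, v) :: rest)).getD (0, 0) 0
          = (PySem.Dict.mk rest).getD (0, 0) 0 := by
        simp [PySem.Dict.getD, PySem.Dict.get?_mk_cons, hk]
      rw [hget, wsum_cons, ih hnd']
      have hne : ¬ (k.1 = 0 ∧ k.2 = 0) := by
        intro hc; exact hk (Prod.ext hc.1 hc.2)
      simp [rtmH, hne]

-- A's non-d_R=2 branch computes rtmH d 6
theorem A_char (d p w : Int) (hd : d ≠ 2) :
    root_tor_multiplicity_py d p w = rtmH d 6 p w := by
  unfold root_tor_multiplicity_py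
  simp only [hd, if_false]
  have h0 : keysND ((PySem.Dict.empty.insert ((p, w) : Int × Int) 1) :
      PySem.Dict (Int × Int) Int).items := by
    simp [keysND, PySem.Dict.empty, PySem.Dict.insert, PySem.Dict.contains]
  obtain ⟨h1, h2⟩ := rtmIter_spec d 6 0 (PySem.Dict.empty.insert (p, w) 1) h0
  rw [getD_eq_wsum d _ h1, h2]
  have : (PySem.Dict.empty.insert ((p, w) : Int × Int) (1 : Int)).items = [((p, w), 1)] := by
    simp [PySem.Dict.empty, PySem.Dict.insert, PySem.Dict.contains]
  rw [this]
  simp [wsum]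

-- degenerate truncations
theorem rtmH_d_nonpos (d : Int) (hd : d ≤ 0) (m : Nat) (rp rw : Int) :
    rtmH d (m + 1) rp rw = 0 := by
  show (List.map _ _).sum = 0
  apply List.sum_eq_zero
  intro x hx
  simp only [List.mem_map] at hx
  obtain ⟨p_i, hp, hx⟩ := hx
  rw [← hx]
  have htw : torWeight d p_i = none := by
    unfold torWeight
    rw [if_pos (Or.inl hd)]
  simp [htw]

theorem rtmH_one (m : Nat) (rp rw : Int) :
    rtmH 1 m rp rw = if rp = 0 ∧ rw = 0 then 1 else 0 := by
  induction m generalizing rp rw with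
  | zero => rfl
  | succ m ih =>
    by_cases hrp : 0 ≤ rp
    · have hcons := PySem.List.pyRange_one_cons (a := 0) (b := rp + 1) (by omega)
      show (List.map _ _).sum = _
      rw [hcons]
      simp only [List.map_cons, List.sum_cons, zero_add]
      have h0 : torWeight 1 0 = some 0 := by
        unfold torWeight
        rw [if_neg (by omega), if_pos rfl]
      rw [h0]
      have htail : (List.map (fun p_i =>
          match torWeight 1 p_i with
          | none => 0
          | some w_i => if w_i > rw then 0 else rtmH 1 m (rp - p_i) (rw - w_i))
          (PySem.List.pyRange 1 (rp + 1) 1)).sum = 0 := by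
        apply List.sum_eq_zero
        intro x hx
        simp only [List.mem_map] at hx
        obtain ⟨q, hq, hx⟩ := hx
        rw [PySem.List.mem_pyRange_one] at hq
        have htw : torWeight 1 q = none := by
          unfold torWeight
          rw [if_pos (Or.inr ⟨rfl, by omega⟩)]
        rw [← hx, htw]
      rw [htail]
      simp only [gt_iff_lt, sub_zero]
      rw [ih]
      split_ifs <;> omega
    · show (List.map _ _).sum = _
      rw [if_neg (by omega)]
      apply List.sum_eq_zero
      intro x hx
      simp only [List.mem_map] at hx
      obtain ⟨q, hq, hx⟩ := hx
      rw [PySem.List.mem_pyRange_one] at hq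
      omega

-- basic facts for d ≥ 3
theorem torWeight_nonneg (d p wi : Int) (hd : 1 ≤ d) (hp : 0 ≤ p)
    (h : torWeight d p = some wi) : 0 ≤ wi := by
  unfold torWeight at h
  rw [PySem.Int.mod_eq_emod_of_pos (by norm_num),
    PySem.Int.floordiv_eq_ediv_of_pos (by norm_num),
    PySem.Int.floordiv_eq_ediv_of_pos (by norm_num)] at h
  split_ifs at h with h1 h2 h3
  · have h' := Option.some.inj h
    omega
  · have h' := Option.some.inj h
    rw [← h']
    exact mul_nonneg (by omega) (by omega)
  · have h' := Option.some.inj h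
    have := mul_nonneg (show (0:Int) ≤ (p - 1) / 2 by omega) (show (0:Int) ≤ d by omega)
    omega

theorem torWeight_eq (d p : Int) (hd : 3 ≤ d) (hp : 0 ≤ p) :
    torWeight d p = some (if p % 2 = 0 then p / 2 * d else (p - 1) / 2 * d + 1) := by
  unfold torWeight
  rw [if_neg (show ¬(d ≤ 0 ∨ (d = 1 ∧ p > 0)) by omega)]
  by_cases hp0 : p = 0
  · subst hp0
    norm_num
  · rw [if_neg hp0]
    rw [PySem.Int.mod_eq_emod_of_pos (show (0:Int) < 2 by norm_num),
      PySem.Int.floordiv_eq_ediv_of_pos (show (0:Int) < 2 by norm_num),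
      PySem.Int.floordiv_eq_ediv_of_pos (show (0:Int) < 2 by norm_num)]
    split_ifs <;> rfl

theorem torWeight_add_two (d q : Int) (hd : 3 ≤ d) (hq : 0 ≤ q) :
    torWeight d (q + 2) = (torWeight d q).map (· + d) := by
  rw [torWeight_eq d q hd hq, torWeight_eq d (q + 2) hd (by omega)]
  simp only [Option.map_some]
  congr 1
  by_cases hpar : q % 2 = 0
  · rw [if_pos hpar, if_pos (show (q + 2) % 2 = 0 by omega)]
    rw [show (q + 2) / 2 = q / 2 + 1 by omega]
    ring
  · rw [if_neg hpar, if_neg (show ¬((q + 2) % 2 = 0) by omega)]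
    rw [show (q + 2 - 1) / 2 = (q - 1) / 2 + 1 by omega]
    ring

theorem rtmH_neg (d : Int) (hd : 1 ≤ d) (m : Nat) (rp rw : Int) (h : rp < 0 ∨ rw < 0) :
    rtmH d m rp rw = 0 := by
  cases m with
  | zero => show (if rp = 0 ∧ rw = 0 then (1:Int) else 0) = 0; rw [if_neg (by omega)]
  | succ m =>
    show (List.map _ _).sum = 0
    apply List.sum_eq_zero
    intro x hx
    simp only [List.mem_map] at hx
    obtain ⟨q, hq, hx⟩ := hx
    rw [PySem.List.mem_pyRange_one] at hq
    rcases h with h | h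
    · omega
    · rw [← hx]
      cases htw : torWeight d q with
      | none => simp
      | some wv =>
        have := torWeight_nonneg d q wv hd (by omega) htw
        simp only []
        rw [if_pos (by omega)]

theorem rtmG_valid_nonneg (d : Int) (hd : 3 ≤ d) (p w : Int)
    (h1 : (d * p - 2 * w) % (d - 2) = 0) (h2 : 0 ≤ (d * p - 2 * w) / (d - 2))
    (h3 : 0 ≤ p - (d * p - 2 * w) / (d - 2)) : 0 ≤ p ∧ 0 ≤ w ∧ (d * p - 2 * w) / (d - 2) ≤ w := by
  set s := (d * p - 2 * w) / (d - 2) with hs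
  have hdvd : (d - 2) ∣ (d * p - 2 * w) := Int.dvd_of_emod_eq_zero h1
  have hmul : s * (d - 2) = d * p - 2 * w := Int.ediv_mul_cancel hdvd
  have h2w : 2 * w = d * (p - s) + 2 * s := by linear_combination hmul
  have hnn := mul_nonneg (show (0:Int) ≤ d by omega) h3
  omega

theorem rtmG_neg (d : Int) (hd : 3 ≤ d) (m : Nat) (p w : Int) (h : p < 0 ∨ w < 0) :
    rtmG d m p w = 0 := by
  cases m with
  | zero => show (if p = 0 ∧ w = 0 then (1:Int) else 0) = 0; rw [if_neg (by omega)]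
  | succ m =>
    simp only [rtmG]
    split_ifs with hc
    · obtain ⟨h1, h2, h3, h4, h5⟩ := hc
      have := rtmG_valid_nonneg d hd p w h1 h2 h5
      omega
    · rfl

theorem pyRange_one_shift (a b k : Int) :
    PySem.List.pyRange (a + k) (b + k) 1 = (PySem.List.pyRange a b 1).map (· + k) := by
  simp only [PySem.List.pyRange, if_neg (show (1:Int) ≠ 0 by norm_num),
    if_pos (show (0:Int) < 1 by norm_num)]
  by_cases hab : a < b
  · rw [if_pos (by omega : a + k < b + k), if_pos hab]
    rw [List.map_map]
    have hc : b + k - (a + k) + 1 - 1 = b - a + 1 - 1 := by ring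
    rw [hc]
    apply List.map_congr_left
    intro i _
    simp
    ring
  · rw [if_neg (by omega : ¬ a + k < b + k), if_neg hab]
    simp

theorem torWeight_zero (d : Int) (hd : 3 ≤ d) : torWeight d 0 = some 0 := by
  unfold torWeight
  rw [if_neg (by omega), if_pos rfl]

theorem torWeight_one (d : Int) (hd : 3 ≤ d) : torWeight d 1 = some 1 := by
  rw [torWeight_eq d 1 hd (by norm_num)]
  norm_num

theorem rtmH_succ_zero (d : Int) (hd : 3 ≤ d) (m : Nat) (rw : Int) :
    rtmH d (m + 1) 0 rw = if 0 > rw then 0 else rtmH d m 0 rw := by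
  show (List.map _ _).sum = _
  rw [show PySem.List.pyRange 0 (0 + 1) 1 = [0] by decide]
  simp only [List.map_cons, List.map_nil, List.sum_cons, List.sum_nil, add_zero]
  rw [torWeight_zero d hd]
  simp only [sub_zero]

theorem rtmH_succ_rec (d : Int) (hd : 3 ≤ d) (m : Nat) (rp rw : Int) (hrp : 1 ≤ rp) :
    rtmH d (m + 1) rp rw
      = (if 0 > rw then 0 else rtmH d m rp rw)
        + (if 1 > rw then 0 else rtmH d m (rp - 1) (rw - 1))
        + rtmH d (m + 1) (rp - 2) (rw - d) := by
  have h1 : PySem.List.pyRange 0 (rp + 1) 1 = 0 :: PySem.List.pyRange (0 + 1) (rp + 1) 1 :=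
    PySem.List.pyRange_one_cons (by omega)
  have h2 : PySem.List.pyRange (0 + 1) (rp + 1) 1
      = 1 :: PySem.List.pyRange (1 + 1) (rp + 1) 1 := by
    rw [show (0:Int) + 1 = 1 by norm_num]
    exact PySem.List.pyRange_one_cons (by omega)
  have h3 : PySem.List.pyRange (1 + 1) (rp + 1) 1
      = (PySem.List.pyRange 0 (rp - 1) 1).map (· + 2) := by
    have := pyRange_one_shift 0 (rp - 1) 2
    rw [show (0:Int) + 2 = 1 + 1 by norm_num, show rp - 1 + 2 = rp + 1 by ring] at this
    exact this
  show (List.map _ _).sum = _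
  rw [h1, h2, h3]
  simp only [List.map_cons, List.sum_cons, List.map_map]
  rw [torWeight_zero d hd, torWeight_one d hd]
  simp only [sub_zero]
  have htail : (List.map ((fun p_i =>
      match torWeight d p_i with
      | none => 0
      | some w_i => if w_i > rw then 0 else rtmH d m (rp - p_i) (rw - w_i)) ∘ (· + 2))
      (PySem.List.pyRange 0 (rp - 1) 1)).sum
      = rtmH d (m + 1) (rp - 2) (rw - d) := by
    show _ = (List.map _ _).sum
    rw [show rp - 2 + 1 = rp - 1 by ring]
    congr 1
    apply List.map_congr_left
    intro q hq
    rw [PySem.List.mem_pyRange_one] at hq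
    simp only [Function.comp_apply]
    rw [torWeight_add_two d q hd (by omega)]
    cases htw : torWeight d q with
    | none => simp
    | some wv =>
      simp only [Option.map_some]
      by_cases hg : wv > rw - d
      · rw [if_pos (by omega), if_pos hg]
      · rw [if_neg (by omega), if_neg hg]
        rw [show rp - (q + 2) = rp - 2 - q by ring, show rw - (wv + d) = rw - d - wv by ring]
  rw [htail]
  ring

theorem rtmG_succ_param (d : Int) (hd : 3 ≤ d) (m : Nat) (s A : Int)
    (h0 : 0 ≤ s) (h1 : 0 ≤ A) (h2 : s ≤ (m : Int) + 1) :
    rtmG d (m + 1) (2 * A + s) (A * d + s)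
      = ((m + 1).choose s.toNat : Int) * ((A + (m : Int)).toNat.choose m : Int) := by
  have hX : d * (2 * A + s) - 2 * (A * d + s) = s * (d - 2) := by ring
  simp only [rtmG, hX]
  have hmod : s * (d - 2) % (d - 2) = 0 := Int.mul_emod_left s (d - 2)
  have hdiv : s * (d - 2) / (d - 2) = s := Int.mul_ediv_cancel s (by omega)
  rw [hmod, hdiv]
  rw [if_pos ⟨rfl, h0, h2, by omega, by omega⟩]
  rw [show (2 * A + s - s) / 2 + (m : Int) = A + (m : Int) by omega]

theorem rtmG_succ_eq_zero (d : Int) (_hd : 3 ≤ d) (m : Nat) (p w : Int)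
    (h : ∀ s A : Int, 0 ≤ s → s ≤ (m : Int) + 1 → 0 ≤ A → p = 2 * A + s → w = A * d + s → False) :
    rtmG d (m + 1) p w = 0 := by
  simp only [rtmG]
  split_ifs with hc
  · exfalso
    obtain ⟨h1, h2, h3, h4, h5⟩ := hc
    set s := (d * p - 2 * w) / (d - 2) with hs
    have hdvd : (d - 2) ∣ (d * p - 2 * w) := Int.dvd_of_emod_eq_zero h1
    have hmul : s * (d - 2) = d * p - 2 * w := Int.ediv_mul_cancel hdvd
    set A := (p - s) / 2 with hA
    have hpA : p - s = 2 * A := by omega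
    have h2w : 2 * w = d * (p - s) + 2 * s := by linear_combination hmul
    have hdA : d * (p - s) = 2 * (A * d) := by rw [hpA]; ring
    exact h s A h2 h3 (by omega) (by omega) (by linarith)
  · rfl

theorem rtmG_zero_left (d : Int) (hd : 3 ≤ d) (m : Nat) (w : Int) :
    rtmG d m 0 w = if w = 0 then 1 else 0 := by
  cases m with
  | zero =>
    show (if (0:Int) = 0 ∧ w = 0 then (1:Int) else 0) = _
    by_cases hw : w = 0 <;> simp [hw]
  | succ m =>
    by_cases hw : w = 0
    · subst hw
      rw [if_pos rfl]
      have := rtmG_succ_param d hd m 0 0 le_rfl le_rfl (by omega)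
      simp only [mul_zero, zero_mul, add_zero, zero_add] at this
      rw [this]
      simp [Nat.choose_self]
    · rw [if_neg hw]
      apply rtmG_succ_eq_zero d hd m 0 w
      intro s A h0 h1 h2 h3 h4
      have hA0 : A = 0 := by omega
      have hs0 : s = 0 := by omega
      rw [hA0, hs0] at h4
      simp at h4
      exact hw h4

theorem rtmG_eq_zero_of_cancel (d : Int) (hd : 3 ≤ d) (m : Nat) (p w t : Int)
    (ht : t < 0 ∨ (m : Int) + 1 < t) (hpw : d * p - 2 * w = t * (d - 2)) :
    rtmG d (m + 1) p w = 0 := by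
  apply rtmG_succ_eq_zero d hd m p w
  intro s A h0 h2 h1 hp hw
  have hst : s * (d - 2) = t * (d - 2) := by
    linear_combination hpw - d * hp + 2 * hw
  have : s = t := mul_right_cancel₀ (show d - 2 ≠ 0 by omega) hst
  omega

theorem rtmG_key_identity (d : Int) (hd : 3 ≤ d) (m : Nat) (rp rw : Int) (hrp : 1 ≤ rp) :
    rtmG d (m + 1) rp rw
      = (if 0 > rw then 0 else rtmG d m rp rw)
        + (if 1 > rw then 0 else rtmG d m (rp - 1) (rw - 1))
        + rtmG d (m + 1) (rp - 2) (rw - d) := by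
  by_cases hEx : ∃ s A : Int, 0 ≤ s ∧ s ≤ (m : Int) + 1 ∧ 0 ≤ A ∧ rp = 2 * A + s ∧ rw = A * d + s
  · obtain ⟨s, A, h0, h2, h1, hp, hw⟩ := hEx
    subst hp; subst hw
    have hAd : 0 ≤ A * d := mul_nonneg h1 (by omega)
    have hrw1 : 1 ≤ A * d + s := by
      rcases (show 1 ≤ s ∨ 1 ≤ A by omega) with h | h
      · linarith
      · nlinarith
    rw [if_neg (by linarith), if_neg (by linarith)]
    rw [rtmG_succ_param d hd m s A h0 h1 h2]
    cases m with
    | zero =>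
      by_cases hA1 : 1 ≤ A
      · have ht1 : rtmG d 0 (2 * A + s) (A * d + s) = 0 := by
          show (if 2 * A + s = 0 ∧ A * d + s = 0 then (1:Int) else 0) = 0
          rw [if_neg (by omega)]
        have ht2 : rtmG d 0 (2 * A + s - 1) (A * d + s - 1) = 0 := by
          show (if 2 * A + s - 1 = 0 ∧ A * d + s - 1 = 0 then (1:Int) else 0) = 0
          rw [if_neg (by omega)]
        have ht3 := rtmG_succ_param d hd 0 s (A - 1) h0 (by omega) h2
        rw [show 2 * (A - 1) + s = 2 * A + s - 2 by ring,
          show (A - 1) * d + s = A * d + s - d by ring] at ht3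
        rw [ht1, ht2, ht3]
        simp [Nat.choose_zero_right]
      · have hA0 : A = 0 := by omega
        have hs1 : s = 1 := by omega
        subst hA0; subst hs1
        have ht1 : rtmG d 0 (2 * 0 + 1) (0 * d + 1) = 0 := by
          show (if 2 * 0 + 1 = 0 ∧ 0 * d + 1 = 0 then (1:Int) else 0) = 0
          rw [if_neg (by omega)]
        have ht2 : rtmG d 0 (2 * 0 + 1 - 1) (0 * d + 1 - 1) = 1 := by
          show (if 2 * 0 + 1 - 1 = 0 ∧ 0 * d + 1 - 1 = 0 then (1:Int) else 0) = 1
          rw [if_pos ⟨by omega, by omega⟩]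
        have ht3 : rtmG d 1 (2 * 0 + 1 - 2) (0 * d + 1 - d) = 0 :=
          rtmG_neg d hd 1 _ _ (Or.inl (by omega))
        rw [ht1, ht2, ht3]
        norm_num
    | succ k =>
      have h2' : s ≤ (k : Int) + 2 := by push_cast at h2; omega
      obtain ⟨a, hsa⟩ : ∃ a : Nat, s = (a : Int) := ⟨s.toNat, by omega⟩
      obtain ⟨b, hAb⟩ : ∃ b : Nat, A = (b : Int) := ⟨A.toNat, by omega⟩
      have hT1 : rtmG d (k + 1) (2 * A + s) (A * d + s)
          = if s ≤ (k : Int) + 1 then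
              ((k + 1).choose a : Int) * ((b + k).choose k : Int) else 0 := by
        by_cases hsk : s ≤ (k : Int) + 1
        · rw [if_pos hsk, rtmG_succ_param d hd k s A h0 h1 hsk]
          rw [show (A + (k : Int)).toNat = b + k by omega, show s.toNat = a by omega]
        · rw [if_neg hsk]
          exact rtmG_eq_zero_of_cancel d hd k _ _ s (Or.inr (by omega)) (by ring)
      have hT2 : rtmG d (k + 1) (2 * A + s - 1) (A * d + s - 1)
          = if 1 ≤ s then
              ((k + 1).choose (a - 1) : Int) * ((b + k).choose k : Int) else 0 := by
        by_cases hs1 : 1 ≤ s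
        · rw [if_pos hs1]
          have := rtmG_succ_param d hd k (s - 1) A (by omega) h1 (by omega)
          rw [show 2 * A + (s - 1) = 2 * A + s - 1 by ring,
            show A * d + (s - 1) = A * d + s - 1 by ring] at this
          rw [this, show (A + (k : Int)).toNat = b + k by omega,
            show (s - 1).toNat = a - 1 by omega]
        · rw [if_neg hs1]
          have hs0 : s = 0 := by omega
          apply rtmG_eq_zero_of_cancel d hd k _ _ (-1) (Or.inl (by omega))
          linear_combination (d - 2) * hs0
      have hT3 : rtmG d (k + 1 + 1) (2 * A + s - 2) (A * d + s - d)
          = ((k + 2).choose a : Int) * ((b + k).choose (k + 1) : Int) := by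
        by_cases hA1 : 1 ≤ A
        · have := rtmG_succ_param d hd (k + 1) s (A - 1) h0 (by omega) (by push_cast; omega)
          rw [show 2 * (A - 1) + s = 2 * A + s - 2 by ring,
            show (A - 1) * d + s = A * d + s - d by ring] at this
          rw [this, show (A - 1 + ((k + 1 : Nat) : Int)).toNat = b + k by omega,
            show s.toNat = a by omega]
        · have hA0 : A = 0 := by omega
          have hb0 : b = 0 := by omega
          rw [rtmG_succ_eq_zero d hd (k + 1) _ _ (fun s' A' h0' h2' h1' hp' hw' => by
            have hss : s' * (d - 2) = s * (d - 2) := by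
              linear_combination 2 * hw' - d * hp'
            have : s' = s := mul_right_cancel₀ (show d - 2 ≠ 0 by omega) hss
            omega)]
          rw [hb0]
          simp
      rw [hT1, hT2, hT3]
      rw [show (A + ((k + 1 : Nat) : Int)).toNat = b + k + 1 by omega,
        show s.toNat = a by omega, show k + 1 + 1 = k + 2 from rfl]
      by_cases hs1 : 1 ≤ s
      · rw [if_pos hs1]
        have ha1 : 1 ≤ a := by omega
        obtain ⟨a', rfl⟩ : ∃ a', a = a' + 1 := ⟨a - 1, by omega⟩
        by_cases hsk : s ≤ (k : Int) + 1
        · rw [if_pos hsk]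
          push_cast
          have hnat : (k + 2).choose (a' + 1) * (b + k + 1).choose (k + 1)
              = (k + 1).choose (a' + 1) * (b + k).choose k
                + (k + 1).choose (a' + 1 - 1) * (b + k).choose k
                + (k + 2).choose (a' + 1) * (b + k).choose (k + 1) := by
            rw [Nat.choose_succ_succ (k + 1) a', Nat.choose_succ_succ (b + k) k]
            simp only [Nat.succ_sub_one]
            ring
          exact_mod_cast hnat
        · rw [if_neg hsk]
          have hka : a' = k + 1 := by omega
          subst hka
          have hnat : (k + 2).choose (k + 1 + 1) * (b + k + 1).choose (k + 1)
              = 0 + (k + 1).choose (k + 1 + 1 - 1) * (b + k).choose k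
                + (k + 2).choose (k + 1 + 1) * (b + k).choose (k + 1) := by
            rw [show k + 1 + 1 = k + 2 from rfl, show k + 2 - 1 = k + 1 from rfl]
            rw [Nat.choose_self, Nat.choose_self, Nat.choose_succ_succ (b + k) k]
            ring
          exact_mod_cast hnat
      · rw [if_pos (by omega), if_neg hs1]
        have ha0 : a = 0 := by omega
        subst ha0
        simp only [Nat.choose_zero_right, Nat.cast_one, one_mul, add_zero]
        rw [show b + k + 1 = (b + k) + 1 from rfl]
        exact_mod_cast Nat.choose_succ_succ (b + k) k

  · have hL : rtmG d (m + 1) rp rw = 0 :=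
      rtmG_succ_eq_zero d hd m rp rw (fun s A h0 h2 h1 hp hw => hEx ⟨s, A, h0, h2, h1, hp, hw⟩)
    have hT3 : rtmG d (m + 1) (rp - 2) (rw - d) = 0 :=
      rtmG_succ_eq_zero d hd m _ _ (fun s A h0 h2 h1 hp hw =>
        hEx ⟨s, A + 1, h0, h2, by omega, by omega, by linear_combination hw⟩)
    have hT1 : rtmG d m rp rw = 0 := by
      cases m with
      | zero =>
        show (if rp = 0 ∧ rw = 0 then (1:Int) else 0) = 0
        rw [if_neg (by omega)]
      | succ k =>
        exact rtmG_succ_eq_zero d hd k rp rw (fun s A h0 h2 h1 hp hw =>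
          hEx ⟨s, A, h0, by push_cast at h2 ⊢; omega, h1, hp, hw⟩)
    have hT2 : rtmG d m (rp - 1) (rw - 1) = 0 := by
      cases m with
      | zero =>
        show (if rp - 1 = 0 ∧ rw - 1 = 0 then (1:Int) else 0) = 0
        rw [if_neg]
        rintro ⟨e1, e2⟩
        exact hEx ⟨1, 0, by norm_num, by norm_num, le_rfl, by omega, by omega⟩
      | succ k =>
        exact rtmG_succ_eq_zero d hd k _ _ (fun s A h0 h2 h1 hp hw =>
          hEx ⟨s + 1, A, by omega, by push_cast at h2 ⊢; omega, h1, by omega,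
            by linear_combination hw⟩)
    rw [hL, hT1, hT2, hT3]
    simp

theorem rtmH_eq_rtmG (d : Int) (hd : 3 ≤ d) (m : Nat) (p w : Int) :
    rtmH d m p w = rtmG d m p w := by
  induction m generalizing p w with
  | zero => rfl
  | succ m ih =>
    have case0 : ∀ w' : Int, rtmH d (m + 1) 0 w' = rtmG d (m + 1) 0 w' := by
      intro w'
      rw [rtmH_succ_zero d hd, rtmG_zero_left d hd (m + 1), ih 0 w', rtmG_zero_left d hd m]
      split_ifs <;> omega
    have main : ∀ n : Nat, ∀ p w : Int, p.toNat ≤ n →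
        rtmH d (m + 1) p w = rtmG d (m + 1) p w := by
      intro n
      induction n with
      | zero =>
        intro p w hp
        by_cases hneg : p < 0
        · rw [rtmH_neg d (by omega) _ _ _ (Or.inl hneg), rtmG_neg d hd _ _ _ (Or.inl hneg)]
        · rw [show p = 0 by omega]
          exact case0 w
      | succ n ihn =>
        intro p w hp
        by_cases hneg : p < 0
        · rw [rtmH_neg d (by omega) _ _ _ (Or.inl hneg), rtmG_neg d hd _ _ _ (Or.inl hneg)]
        · by_cases hp0 : p = 0
          · rw [hp0]; exact case0 w
          · have hp1 : 1 ≤ p := by omega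
            rw [rtmH_succ_rec d hd m p w hp1, ih p w, ih (p - 1) (w - 1)]
            have hrec : rtmH d (m + 1) (p - 2) (w - d) = rtmG d (m + 1) (p - 2) (w - d) := by
              by_cases h2 : p - 2 < 0
              · rw [rtmH_neg d (by omega) _ _ _ (Or.inl h2),
                  rtmG_neg d hd _ _ _ (Or.inl h2)]
              · exact ihn (p - 2) (w - d) (by omega)
            rw [hrec, ← rtmG_key_identity d hd m p w hp1]
    exact main p.toNat p w le_rfl

theorem B_eq_G (d p w : Int) (hd : 3 ≤ d) :
    root_tor_multiplicity_py_alt d p w = rtmG d 6 p w := by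
  unfold root_tor_multiplicity_py_alt
  rw [if_neg (by omega), if_neg (by omega), if_neg (by omega)]
  rw [show (6 : Nat) = 5 + 1 from rfl]
  simp only [rtmG]
  simp only [PySem.Int.mod_eq_emod_of_pos (show (0:Int) < d - 2 by omega),
    PySem.Int.floordiv_eq_ediv_of_pos (show (0:Int) < d - 2 by omega),
    PySem.Int.mod_eq_emod_of_pos (show (0:Int) < 2 by norm_num),
    PySem.Int.floordiv_eq_ediv_of_pos (show (0:Int) < 2 by norm_num)]
  set s := (d * p - 2 * w) / (d - 2) with hs
  by_cases h1 : (d * p - 2 * w) % (d - 2) = 0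
  · rw [if_neg (by simp [h1])]
    by_cases h2 : s < 0 ∨ 6 < s ∨ (p - s) % 2 ≠ 0
    · rw [if_pos h2, if_neg (by push_cast; omega)]
    · rw [if_neg h2]
      by_cases h3 : (p - s) / 2 < 0
      · rw [if_pos h3, if_neg (by push_cast; omega)]
      · rw [if_neg h3, if_pos (by push_cast; omega)]
        unfold pyComb
        rw [show (6 : Int).toNat = 6 from rfl,
          show ((p - s) / 2 + 6 - 1 : Int) = (p - s) / 2 + 5 by ring,
          show ((6 : Int) - 1).toNat = 5 from rfl]
        norm_cast
  · rw [if_pos (by simp [h1]), if_neg (by push_cast; omega)]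

-- ===== VERDICT (by name: the statement is the Claim_ definition above) =====
theorem root_tor_multiplicity_py_spec : Claim_equal_root_tor_multiplicity_py := by
  intro d p w _ _
  unfold Spec_root_tor_multiplicity_py
  by_cases hd2 : d = 2
  · subst hd2; rfl
  · rw [A_char d p w hd2]
    by_cases hd0 : d ≤ 0
    · show rtmH d 6 p w = _
      rw [show (6 : Nat) = 5 + 1 from rfl, rtmH_d_nonpos d hd0]
      simp [root_tor_multiplicity_py_alt, hd2, hd0]
    · by_cases hd1 : d = 1
      · subst hd1
        rw [rtmH_one]
        simp [root_tor_multiplicity_py_alt]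
      · have hd3 : 3 ≤ d := by omega
        rw [rtmH_eq_rtmG d hd3, ← B_eq_G d p w hd3]
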